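-- pv_equiv track=rewrite | github.com/SuleymanovTahir/beauty-crm | backend/services/auto_booking.py | _find_best_slot
-- ===== SOURCE A (Python) =====
-- from typing import Dict, List, Any, Optional
--
-- def _find_best_slot(available_slots: List[str], preferred_time: str) -> Optional[str]:
--     """Найти лучший слот из доступных"""
--     if not available_slots:
--         return None
--
--     # Разделяем слоты по времени дня
--     morning = []  # 00:00-12:00
--     afternoon = []  # 12:00-17:00
--     evening = []  # 17:00-23:59
--
--     for slot in available_slots:
--         hour = int(slot.split(':')[0])
--         if hour < 12:
--             morning.append(slot)
--         elif hour < 17: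
--             afternoon.append(slot)
--         else:
--             evening.append(slot)
--
--     # Выбираем слот в соответствии с предпочтением
--     if preferred_time == 'morning' and morning:
--         return morning[0]
--     elif preferred_time == 'afternoon' and afternoon:
--         return afternoon[0]
--     elif preferred_time == 'evening' and evening:
--         return evening[0]
--
--     # Если нет в предпочитаемое время, берем первый доступный
--     return available_slots[0]
-- ===== SOURCE B (Python) =====
-- def _find_best_slot(available_slots, preferred_time):
--     """Найти лучший слот из доступных"""
--     if not available_slots:
--         return None
--     # parse all slots up front (a malformed slot raises ValueError just as in A)
--     hours = [int(s.split(':')[0]) for s in available_slots]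
--     checks = {
--         'morning': lambda h: h < 12,
--         'afternoon': lambda h: 12 <= h < 17,
--         'evening': lambda h: h >= 17,
--     }
--     pred = checks.get(preferred_time)
--     if pred is not None:
--         for slot, h in zip(available_slots, hours):
--             if pred(h):
--                 return slot
--     return available_slots[0]
-- ===== Notes on version B (the rewrite author's own statement) =====
-- stated objective: simpler
-- what changed: Instead of partitioning all slots into three morning/afternoon/evening lists and then indexing one of them, B maps preferred_time to an hour predicate and does a single first-match scan over the precomputed hours, falling back to the first slot.
import Mathlib
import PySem

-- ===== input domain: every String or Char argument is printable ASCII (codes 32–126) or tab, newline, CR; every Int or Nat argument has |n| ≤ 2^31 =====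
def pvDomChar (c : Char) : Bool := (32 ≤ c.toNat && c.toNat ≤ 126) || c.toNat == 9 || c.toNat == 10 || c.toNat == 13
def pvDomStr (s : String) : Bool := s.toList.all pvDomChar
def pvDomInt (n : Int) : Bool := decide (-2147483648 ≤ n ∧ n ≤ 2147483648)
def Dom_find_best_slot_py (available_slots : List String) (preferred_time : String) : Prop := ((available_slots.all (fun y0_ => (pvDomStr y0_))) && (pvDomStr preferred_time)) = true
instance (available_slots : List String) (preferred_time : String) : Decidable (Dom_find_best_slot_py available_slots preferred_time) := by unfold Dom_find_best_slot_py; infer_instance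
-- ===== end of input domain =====

-- B replaces A's three-way partition + index with a preferred-time hour predicate and a single
-- first-match scan over precomputed hours (objective: simpler).

-- shared by both ports: hour = int(slot.split(':')[0]); the `.getD 0` default is only reached
-- where Python raises ValueError, i.e. outside Pre_ (exact inside Pre_).
def pvHour (s : String) : Int :=
  (PySem.Int.ofStr? (((PySem.Str.split? s ":").getD []).headD "")).getD 0

-- ===== PORT A =====
def pvStepA (acc : List String × List String × List String) (slot : String) :
    List String × List String × List String :=
  let hour := pvHour slot
  if hour < 12 then (acc.1 ++ [slot], acc.2.1, acc.2.2)
  else if hour < 17 then (acc.1, acc.2.1 ++ [slot], acc.2.2)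
  else (acc.1, acc.2.1, acc.2.2 ++ [slot])

def find_best_slot_py (available_slots : List String) (preferred_time : String) : Option String :=
  if available_slots = [] then none
  else
    let st := available_slots.foldl pvStepA ([], [], [])
    if preferred_time = "morning" ∧ st.1 ≠ [] then st.1.head?
    else if preferred_time = "afternoon" ∧ st.2.1 ≠ [] then st.2.1.head?
    else if preferred_time = "evening" ∧ st.2.2 ≠ [] then st.2.2.head?
    else available_slots.head?

-- ===== PORT B =====
def pvPredB (preferred_time : String) (h : Int) : Bool :=
  if preferred_time = "morning" then h < 12
  else if preferred_time = "afternoon" then decide (12 ≤ h) && decide (h < 17)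
  else if preferred_time = "evening" then 17 ≤ h
  else false

def find_best_slot_py_alt (available_slots : List String) (preferred_time : String) : Option String :=
  match available_slots with
  | [] => none
  | _ :: _ =>
    let hours := available_slots.map pvHour
    match (available_slots.zip hours).find? (fun p => pvPredB preferred_time p.2) with
    | some p => some p.1
    | none => available_slots.head?

-- ===== PRECONDITION & SPEC =====
-- Pre_ excludes exactly the inputs where Python A raises ValueError (a slot whose text before
-- the first ':' is not an int literal); B raises there too.
def Pre_find_best_slot_py (available_slots : List String) (preferred_time : String) : Prop :=
  ∀ s ∈ available_slots, (PySem.Int.ofStr? (((PySem.Str.split? s ":").getD []).headD "")).isSome = true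
instance (available_slots : List String) (preferred_time : String) : Decidable (Pre_find_best_slot_py available_slots preferred_time) := by unfold Pre_find_best_slot_py; infer_instance

def pvWitness_find_best_slot_py : List String × String := (["13:00", "09:30", "18:00"], "evening")

def Spec_find_best_slot_py (available_slots : List String) (preferred_time : String) (out : Option String) : Prop := out = find_best_slot_py_alt available_slots preferred_time
instance (available_slots : List String) (preferred_time : String) (out : Option String) : Decidable (Spec_find_best_slot_py available_slots preferred_time out) := by unfold Spec_find_best_slot_py; infer_instance

-- ===== CLAIM (what is proved, stated in full; the proofs are below) =====
def Claim_equal_find_best_slot_py : Prop := ∀ (available_slots : List String) (preferred_time : String), Dom_find_best_slot_py available_slots preferred_time → Pre_find_best_slot_py available_slots preferred_time → Spec_find_best_slot_py available_slots preferred_time (find_best_slot_py available_slots preferred_time)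

-- ===== LEMMAS AND PROOFS =====

lemma pvfold_eq (l : List String) (m a e : List String) :
    l.foldl pvStepA (m, a, e) =
      (m ++ l.filter (fun s => decide (pvHour s < 12)),
       a ++ l.filter (fun s => !decide (pvHour s < 12) && decide (pvHour s < 17)),
       e ++ l.filter (fun s => !decide (pvHour s < 12) && !decide (pvHour s < 17))) := by
  induction l generalizing m a e with
  | nil => simp
  | cons x xs ih =>
    by_cases h1 : pvHour x < 12
    · simp [List.foldl_cons, pvStepA, h1, ih]
    · by_cases h2 : pvHour x < 17 <;> simp [List.foldl_cons, pvStepA, h1, h2, ih]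

lemma pvzip_find (l : List String) (q : Int → Bool) :
    (l.zip (l.map pvHour)).find? (fun p => q p.2)
      = (l.find? (fun s => q (pvHour s))).map (fun s => (s, pvHour s)) := by
  induction l with
  | nil => simp
  | cons x xs ih =>
    by_cases h : q (pvHour x) <;> simp [List.find?, h, ih]

lemma pvfind_filter (l : List String) (p : String → Bool) :
    l.find? p = (l.filter p).head? := by
  induction l with
  | nil => rfl
  | cons x xs ih =>
    rw [List.find?_cons, List.filter_cons]
    cases h : p x
    · simpa using ih
    · rfl

-- one branch of the case analysis: A's "filter nonempty → its head, else first" equals B's find?-scan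
lemma pvbranch (x : String) (xs : List String) (p : String → Bool) :
    (if (x :: xs).filter p ≠ [] then ((x :: xs).filter p).head? else (x :: xs).head?)
      = (match ((x :: xs).find? p).map (fun s => (s, pvHour s)) with
         | some pr => some pr.1
         | none => (x :: xs).head?) := by
  rw [pvfind_filter]
  cases hf : ((x :: xs).filter p).head? with
  | none =>
    have : (x :: xs).filter p = [] := by
      cases hl : (x :: xs).filter p with
      | nil => rfl
      | cons y ys => rw [hl] at hf; simp at hf
    simp [this]
  | some y =>
    have : (x :: xs).filter p ≠ [] := by
      intro hl; rw [hl] at hf; simp at hf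
    simp [this]

-- ===== VERDICT (by name: the statement is the Claim_ definition above) =====
theorem find_best_slot_py_spec : Claim_equal_find_best_slot_py := by
  intro slots pt _ _
  unfold Spec_find_best_slot_py
  cases slots with
  | nil => rfl
  | cons x xs =>
    show find_best_slot_py (x :: xs) pt = _
    unfold find_best_slot_py find_best_slot_py_alt
    simp only [reduceCtorEq, if_false, pvfold_eq, List.nil_append]
    rw [pvzip_find]
    by_cases hm : pt = "morning"
    · subst hm
      simpa [pvPredB] using pvbranch x xs (fun s => decide (pvHour s < 12))
    · by_cases ha : pt = "afternoon"
      · subst ha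
        have hpe : (fun s => !decide (pvHour s < 12) && decide (pvHour s < 17))
            = (fun s => decide (12 ≤ pvHour s) && decide (pvHour s < 17)) := by
          funext s
          by_cases h : pvHour s < 12 <;> simp [h] <;> omega
        simp only [hm, false_and, if_false, hpe]
        simpa [pvPredB, hm] using pvbranch x xs (fun s => decide (12 ≤ pvHour s) && decide (pvHour s < 17))
      · by_cases he : pt = "evening"
        · subst he
          have hpe : (fun s => !decide (pvHour s < 12) && !decide (pvHour s < 17))
              = (fun s => decide (17 ≤ pvHour s)) := by
            funext s
            by_cases h : pvHour s < 12 <;> by_cases h2 : pvHour s < 17 <;>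
              simp [h, h2] <;> omega
          simp only [hm, ha, false_and, if_false, hpe]
          simpa [pvPredB, hm, ha] using pvbranch x xs (fun s => decide (17 ≤ pvHour s))
        · have hfn : List.find? (fun s => pvPredB pt (pvHour s)) (x :: xs) = none :=
            List.find?_eq_none.mpr (fun y _ => by simp [pvPredB, hm, ha, he])
          simp [hm, ha, he, hfn]
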